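-- pv_equiv track=rewrite | github.com/snehra0224/statistical_ema | makesets.py | setSize2trCV
-- ===== SOURCE A (Python) =====
-- SETSIZE=460
--
-- def setSize2trCV(partition):
-- 	trNumbers = []
-- 	for i in range(0, SETSIZE):
-- 		trNumbers.append(0)
-- 	i = 0
-- 	for j in range(1,SETSIZE+1):
-- 		if(j%5!=partition):
-- 			trNumbers[i]=j
-- 			i+=1
-- 	return trNumbers
-- ===== SOURCE B (Python) =====
-- SETSIZE = 460
--
-- def setSize2trCV(partition):
--     # The kept values are periodic with period 5: compute the residue pattern
--     # once (5 mod tests), tile it over the 92 blocks, then pad with zeros.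
--     residues = [r for r in range(1, 6) if r % 5 != partition]
--     vals = [base + r for base in range(0, SETSIZE, 5) for r in residues]
--     return vals + [0] * (SETSIZE - len(vals))
-- ===== Notes on version B (the rewrite author's own statement) =====
-- stated objective: alternative
-- what changed: Exploits the period-5 structure: computes the set of kept residues once (5 modulo tests) and tiles that pattern over the 92 blocks of 5, instead of A's 460 per-element modulo tests writing into a preallocated zero array via a manual counter; the zero padding is appended from the computed length.
import Mathlib
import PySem

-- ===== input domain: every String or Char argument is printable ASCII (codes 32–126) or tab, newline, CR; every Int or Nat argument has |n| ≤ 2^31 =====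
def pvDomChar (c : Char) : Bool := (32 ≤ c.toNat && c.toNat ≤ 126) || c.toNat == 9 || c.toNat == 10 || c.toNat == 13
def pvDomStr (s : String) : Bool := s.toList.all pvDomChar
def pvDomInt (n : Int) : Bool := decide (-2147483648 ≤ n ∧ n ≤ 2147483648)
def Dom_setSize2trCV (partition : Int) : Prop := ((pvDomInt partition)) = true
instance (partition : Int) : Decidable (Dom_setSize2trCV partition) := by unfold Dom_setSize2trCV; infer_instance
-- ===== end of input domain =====

-- B exploits the period-5 structure: the kept residue pattern is computed once and
-- tiled over the 92 blocks of 5, then the zero padding is appended; A instead tests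
-- j%5 for all 460 values and overwrites a preallocated zero array via a counter.

-- ===== PORT A =====
def setSize2trCV (partition : Int) : List Int :=
  ((PySem.List.pyRange 1 461 1).foldl
      (fun (s : List Int × Int) j =>
        if PySem.Int.mod j 5 ≠ partition then (PySem.List.pySetD s.1 s.2 j, s.2 + 1) else s)
      ((PySem.List.pyRange 0 460 1).foldl (fun acc _ => acc ++ [(0 : Int)]) [], (0 : Int))).1

-- ===== PORT B =====
def setSize2trCV_alt (partition : Int) : List Int :=
  let residues := (PySem.List.pyRange 1 6 1).filter (fun r => PySem.Int.mod r 5 ≠ partition)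
  let vals := (PySem.List.pyRange 0 460 5).flatMap (fun base => residues.map (fun r => base + r))
  vals ++ List.replicate (460 - vals.length) (0 : Int)

-- ===== PRECONDITION & SPEC =====
def Spec_setSize2trCV (partition : Int) (out : List Int) : Prop := out = setSize2trCV_alt partition
instance (partition : Int) (out : List Int) : Decidable (Spec_setSize2trCV partition out) := by unfold Spec_setSize2trCV; infer_instance

-- ===== CLAIM (what is proved, stated in full; the proofs are below) =====
def Claim_equal_setSize2trCV : Prop := ∀ (partition : Int), Dom_setSize2trCV partition → Spec_setSize2trCV partition (setSize2trCV partition)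

-- ===== LEMMAS AND PROOFS =====

-- A's first loop builds a list of zeros, one per element of the iterated list.
lemma zeros_foldl (l : List Int) (acc : List Int) :
    l.foldl (fun acc _ => acc ++ [(0 : Int)]) acc = acc ++ List.replicate l.length 0 := by
  induction l generalizing acc with
  | nil => simp
  | cons x xs ih => simp [List.foldl_cons, ih, List.replicate_succ]

-- Overwriting the first free slot of the zero padding appends one kept value.
lemma set_pad (v : List Int) (m : Nat) (hm : 0 < m) (x : Int) :
    (v ++ List.replicate m (0 : Int)).set v.length x = (v ++ [x]) ++ List.replicate (m - 1) 0 := by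
  obtain ⟨m', rfl⟩ : ∃ m', m = m' + 1 := ⟨m - 1, by omega⟩
  rw [List.replicate_succ]
  rw [List.set_append_right _ _ (le_refl _)]
  simp

-- Characterization of A's second loop: after processing 1..n the state is the
-- kept values followed by the remaining zeros, with the counter at their number.
lemma loop_char (p : Int) (n N : Nat) (h : n ≤ N) :
    (PySem.List.pyRange 1 ((n : Int) + 1) 1).foldl
      (fun (s : List Int × Int) j =>
        if PySem.Int.mod j 5 ≠ p then (PySem.List.pySetD s.1 s.2 j, s.2 + 1) else s)
      (List.replicate N (0 : Int), (0 : Int))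
    = ((PySem.List.pyRange 1 ((n : Int) + 1) 1).filter (fun j => PySem.Int.mod j 5 ≠ p)
         ++ List.replicate (N - ((PySem.List.pyRange 1 ((n : Int) + 1) 1).filter
              (fun j => PySem.Int.mod j 5 ≠ p)).length) 0,
       (((PySem.List.pyRange 1 ((n : Int) + 1) 1).filter
              (fun j => PySem.Int.mod j 5 ≠ p)).length : Int)) := by
  induction n with
  | zero =>
    rw [PySem.List.pyRange_one_eq_nil (by norm_num)]
    simp
  | succ n ih =>
    have hn : n ≤ N := Nat.le_of_succ_le h
    have hcast : ((n + 1 : Nat) : Int) + 1 = ((n : Int) + 1) + 1 := by push_cast; ring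
    rw [hcast, PySem.List.pyRange_one_succ_right (by omega), List.foldl_append, ih hn,
        List.filter_append]
    have hlen : ((PySem.List.pyRange 1 ((n : Int) + 1) 1).filter
        (fun j => PySem.Int.mod j 5 ≠ p)).length ≤ n := by
      calc _ ≤ (PySem.List.pyRange 1 ((n : Int) + 1) 1).length := List.length_filter_le _ _
        _ = n := by rw [PySem.List.length_pyRange_one]; omega
    by_cases hP : PySem.Int.mod ((n : Int) + 1) 5 ≠ p
    · set v := (PySem.List.pyRange 1 ((n : Int) + 1) 1).filter
        (fun j => decide (PySem.Int.mod j 5 ≠ p)) with hv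
      rw [List.foldl_cons, if_pos hP, List.foldl_nil]
      simp only [PySem.List.pySetD_natCast]
      rw [set_pad v (N - v.length) (by omega) ((n : Int) + 1)]
      have h1 : N - (v.length + 1) = N - v.length - 1 := by omega
      have hP' : ((n : Int) + 1) % 5 ≠ p := by
        rwa [← PySem.Int.mod_eq_emod_of_pos (by norm_num)]
      simp [hP', List.append_assoc, h1]
    · rw [List.foldl_cons, if_neg hP, List.foldl_nil]
      have hP' : ((n : Int) + 1) % 5 = p := by
        rw [← PySem.Int.mod_eq_emod_of_pos (by norm_num)]
        exact not_not.mp hP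
      simp [hP']

-- The filter-then-pad normal form (what loop_char shows A computes) equals B's
-- tiled form: decide for p ∈ {0,…,4}; otherwise both filters keep everything.
set_option maxRecDepth 100000 in
lemma mid_eq_alt (p : Int) :
    (PySem.List.pyRange 1 461 1).filter (fun j => PySem.Int.mod j 5 ≠ p)
      ++ List.replicate (460 - ((PySem.List.pyRange 1 461 1).filter
            (fun j => PySem.Int.mod j 5 ≠ p)).length) 0
    = setSize2trCV_alt p := by
  by_cases h0 : p = 0; · subst h0; decide
  by_cases h1 : p = 1; · subst h1; decide
  by_cases h2 : p = 2; · subst h2; decide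
  by_cases h3 : p = 3; · subst h3; decide
  by_cases h4 : p = 4; · subst h4; decide
  have hbig : ∀ j ∈ PySem.List.pyRange 1 461 1, 1 ≤ j ∧ j ≤ 460 := by decide
  have hall : ∀ j ∈ PySem.List.pyRange 1 461 1,
      (decide (PySem.Int.mod j 5 ≠ p)) = true := by
    intro j hj
    have := PySem.Int.mod_nonneg j (b := 5) (by norm_num)
    have := PySem.Int.mod_lt j (b := 5) (by norm_num)
    simp only [decide_eq_true_eq]
    omega
  have hres : ∀ r ∈ PySem.List.pyRange 1 6 1,
      (decide (PySem.Int.mod r 5 ≠ p)) = true := by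
    intro r hr
    have := PySem.Int.mod_nonneg r (b := 5) (by norm_num)
    have := PySem.Int.mod_lt r (b := 5) (by norm_num)
    simp only [decide_eq_true_eq]
    omega
  unfold setSize2trCV_alt
  rw [List.filter_eq_self.mpr hall, List.filter_eq_self.mpr hres]
  decide

-- ===== VERDICT (by name: the statement is the Claim_ definition above) =====
theorem setSize2trCV_spec : Claim_equal_setSize2trCV := by
  intro p _
  unfold Spec_setSize2trCV setSize2trCV
  rw [zeros_foldl]
  have hlen0 : (PySem.List.pyRange 0 460 1).length = 460 := by
    rw [PySem.List.length_pyRange_one]; rfl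
  rw [hlen0, List.nil_append]
  have h461 : (461 : Int) = ((460 : Nat) : Int) + 1 := by norm_num
  rw [h461, loop_char p 460 460 (le_refl _)]
  rw [← h461]
  exact mid_eq_alt p
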